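-- pv_equiv track=rewrite | github.com/pypi-data/pypi-mirror-371 | packages/newscatcher-sdk/newscatcher_sdk-1.4.0-py3-none-any.whl/newscatcher/client.py | _tokenize_query_for_same_level_check
-- ===== SOURCE A (Python) =====
-- from typing import Optional, Union, List, Set, Tuple, Any
--
-- def _tokenize_query_for_same_level_check(query: str) -> List[str]:
--     """
--     Tokenize query preserving quoted phrases, operators, and parentheses.
--
--     Returns tokens like: ['AI', 'OR', 'artificial', 'intelligence']
--     or ['AI', 'OR', '"artificial intelligence"']
--     """
--     tokens = []
--     i = 0
--     current_token = ""
--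
--     while i < len(query):
--         char = query[i]
--
--         # Handle quoted phrases (including escaped quotes)
--         if char == '"':
--             if current_token:
--                 tokens.append(current_token.strip())
--                 current_token = ""
--
--             # Collect the entire quoted phrase
--             quoted_phrase = '"'
--             i += 1
--             while i < len(query):
--                 if query[i] == '"':
--                     quoted_phrase += '"'
--                     i += 1
--                     break
--                 elif query[i] == '\\' and i + 1 < len(query) and query[i + 1] == '"':
--                     # Handle escaped quotes
--                     quoted_phrase += query[i:i+2]
--                     i += 2
--                 else:
--                     quoted_phrase += query[i]
--                     i += 1
--
--             tokens.append(quoted_phrase)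
--             continue
--
--         # Handle operators and parentheses
--         elif char in '()':
--             if current_token:
--                 tokens.append(current_token.strip())
--                 current_token = ""
--             tokens.append(char)
--             i += 1
--             continue
--
--         # Handle spaces - potential token boundaries
--         elif char == ' ':
--             if current_token:
--                 token = current_token.strip()
--                 if token:
--                     tokens.append(token)
--                 current_token = ""
--             i += 1
--             continue
--
--         else:
--             current_token += char
--             i += 1
--
--     # Add final token
--     if current_token:
--         token = current_token.strip()
--         if token:
--             tokens.append(token)
--
--     return tokens
-- ===== SOURCE B (Python) =====
-- from typing import List
--
--
-- def _tokenize_query_for_same_level_check(query: str) -> List[str]: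
--     """Span-based tokenizer: cuts whole tokens out of the string by index
--     spans instead of accumulating characters one by one."""
--     tokens = []
--     i, n = 0, len(query)
--     while i < n:
--         c = query[i]
--         if c == ' ':
--             i += 1
--         elif c == '"':
--             j = i + 1
--             while j < n:
--                 if query[j] == '"':
--                     j += 1
--                     break
--                 if query[j] == '\\' and j + 1 < n and query[j + 1] == '"':
--                     j += 2
--                 else:
--                     j += 1
--             tokens.append(query[i:j])
--             i = j
--         elif c in '()':
--             tokens.append(c)
--             i += 1
--         else:
--             j = i
--             while j < n and query[j] not in ' ()"':
--                 j += 1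
--             word = query[i:j].strip()
--             if word:
--                 tokens.append(word)
--             i = j
--     return tokens
-- ===== Notes on version B (the rewrite author's own statement) =====
-- stated objective: faster
-- what changed: Replaced the character-accumulator state machine (current_token/quoted_phrase built by one-char string concatenations, flushed at boundaries) with a span-based scanner that at each position cuts a whole token (quoted phrase, parenthesis, or maximal word run) out of the string by index spans and slicing, with no pending-token state.
-- intended difference: On queries containing a top-level run of non-space whitespace (tab/newline/CR) immediately followed by a quote or parenthesis, A appends the stripped-to-empty run as an empty-string token (e.g. '\t(' -> ['', '(']) while B omits it ('\t(' -> ['(']); an empty token is useless to any consumer of the token list, so B's value is the intended one. — e.g. on _tokenize_query_for_same_level_check("\t("): A returns ["", "("], B returns ["("]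
import Mathlib
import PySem

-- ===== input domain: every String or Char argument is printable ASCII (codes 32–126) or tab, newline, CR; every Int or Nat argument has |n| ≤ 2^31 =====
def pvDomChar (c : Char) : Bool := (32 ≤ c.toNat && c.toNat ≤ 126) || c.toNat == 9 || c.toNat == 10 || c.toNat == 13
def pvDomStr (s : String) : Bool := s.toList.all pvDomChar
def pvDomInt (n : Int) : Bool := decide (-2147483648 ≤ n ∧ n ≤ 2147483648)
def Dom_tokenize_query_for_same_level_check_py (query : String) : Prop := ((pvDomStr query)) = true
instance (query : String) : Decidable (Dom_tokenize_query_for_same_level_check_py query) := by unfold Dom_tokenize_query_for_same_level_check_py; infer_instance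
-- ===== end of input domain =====

-- B replaces A's character-accumulator state machine by a span-based scanner that cuts whole
-- tokens out of the string by slicing (measurably faster: no per-char concatenation); outside
-- D_ below the return values agree, inside D_ B intentionally drops the empty tokens A emits.

-- ===== PORT A =====

-- inner 'while' collecting the quoted phrase: state = (remaining chars, phrase so far);
-- returns (quoted_phrase, remaining input after the phrase); the backslash-quote pattern is
-- "query[i]=='\\' and i+1<len(query) and query[i+1]=='\"'"
def pvAQuoted : List Char → List Char → List Char × List Char
  | [], acc => (acc, [])
  | c :: rest, acc =>
    if c = '"' then (acc ++ ['"'], rest)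
    else if c = '\\' ∧ rest.head? = some '"' then pvAQuoted rest.tail (acc ++ ['\\', '"'])
    else pvAQuoted rest (acc ++ [c])
termination_by l _ => l.length
decreasing_by
  all_goals (simp [List.length_tail]; try omega)

theorem pvAQuoted_snd_length_le (rest acc : List Char) : (pvAQuoted rest acc).2.length ≤ rest.length := by
  induction rest, acc using pvAQuoted.induct with
  | _ => (try rw [pvAQuoted]) <;> split_ifs <;> simp_all [List.length_tail] <;> omega

-- main 'while' of A: state = (remaining chars, current_token, tokens)
def pvALoop : List Char → List Char → List String → List String
  | [], cur, toks =>
    if cur ≠ [] then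
      (if PySem.Chars.strip cur ≠ [] then toks ++ [String.ofList (PySem.Chars.strip cur)] else toks)
    else toks
  | c :: rest, cur, toks =>
    if c = '"' then
      let toks1 := if cur ≠ [] then toks ++ [String.ofList (PySem.Chars.strip cur)] else toks
      let q := pvAQuoted rest ['"']
      pvALoop q.2 [] (toks1 ++ [String.ofList q.1])
    else if c = '(' ∨ c = ')' then
      let toks1 := if cur ≠ [] then toks ++ [String.ofList (PySem.Chars.strip cur)] else toks
      pvALoop rest [] (toks1 ++ [String.ofList [c]])
    else if c = ' ' then
      let toks1 := if cur ≠ [] then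
          (if PySem.Chars.strip cur ≠ [] then toks ++ [String.ofList (PySem.Chars.strip cur)] else toks)
        else toks
      pvALoop rest [] toks1
    else pvALoop rest (cur ++ [c]) toks
termination_by cs _ _ => cs.length
decreasing_by
  all_goals simp
  have := pvAQuoted_snd_length_le rest ['"']
  omega

-- ===== PORT B =====

-- B's inner quote scan (the j-loop): given the chars after the opening '"', returns
-- (chars of the phrase incl. the closing '"' if present, rest of the input)
def pvBQuote : List Char → List Char × List Char
  | [] => ([], [])
  | c :: rest =>
    if c = '"' then (['"'], rest)
    else if c = '\\' ∧ rest.head? = some '"' then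
      let p := pvBQuote rest.tail
      ('\\' :: '"' :: p.1, p.2)
    else
      let p := pvBQuote rest
      (c :: p.1, p.2)
termination_by l => l.length
decreasing_by
  all_goals (simp [List.length_tail]; try omega)

theorem pvBQuote_snd_length_le : ∀ (l : List Char), (pvBQuote l).2.length ≤ l.length := by
  intro l
  induction l using pvBQuote.induct with
  | _ => (try rw [pvBQuote]) <;> split_ifs <;> simp_all [List.length_tail] <;> omega

-- query[j] not in ' ()"'
def pvWordChar (c : Char) : Bool := !(c == ' ' || c == '(' || c == ')' || c == '"')

-- B's outer while: one whole token is cut out per step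
def pvBScan : List Char → List String
  | [] => []
  | c :: rest =>
    if c = ' ' then pvBScan rest
    else if c = '"' then
      let p := pvBQuote rest
      String.ofList ('"' :: p.1) :: pvBScan p.2
    else if c = '(' ∨ c = ')' then String.ofList [c] :: pvBScan rest
    else
      let w := PySem.Chars.strip (c :: rest.takeWhile pvWordChar)
      (if w ≠ [] then [String.ofList w] else []) ++ pvBScan (rest.dropWhile pvWordChar)
termination_by cs => cs.length
decreasing_by
  all_goals simp
  · have := pvBQuote_snd_length_le rest; omega
  · have := List.length_dropWhile_le pvWordChar rest; omega

def tokenize_query_for_same_level_check_py (query : String) : List String :=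
  pvALoop query.toList [] []

def tokenize_query_for_same_level_check_py_alt (query : String) : List String :=
  pvBScan query.toList

-- ===== PRECONDITION & SPEC =====

-- helper for D_ (it only classifies the input, it builds no token output): a one-pass
-- automaton over the characters; state = (previous char, "inside a quoted phrase", pending
-- word run: none = empty, some b with b = "the run is entirely whitespace so far").
-- Inside quotes a '"' closes the phrase iff it is not immediately preceded by '\\'.
-- The result is true iff some top-level all-whitespace nonempty run abuts a '"', '(' or ')'.
def pvDAux : List Char → Char → Bool → Option Bool → Bool
  | [], _, _, _ => false
  | c :: rest, prev, true, _ =>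
    if c = '"' ∧ prev ≠ '\\' then pvDAux rest c false none
    else pvDAux rest c true none
  | c :: rest, _, false, pend =>
    if c = '"' then (pend == some true) || pvDAux rest c true none
    else if c = '(' ∨ c = ')' then (pend == some true) || pvDAux rest c false none
    else if c = ' ' then pvDAux rest c false none
    else if PySem.Chars.isspace c then pvDAux rest c false (some (pend != some false))
    else pvDAux rest c false (some false)

-- On queries containing a top-level run of non-space whitespace (tab/newline/CR) immediately
-- followed by a quote or parenthesis, A appends the stripped-to-empty run as an empty-string
-- token (e.g. "\t(" -> ["", "("]) while B omits it ("\t(" -> ["("]); an empty token is useless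
-- to any consumer of the token list, so B's value is the intended one.
def D_tokenize_query_for_same_level_check_py (query : String) : Prop :=
  pvDAux query.toList ' ' false none = true

instance (query : String) : Decidable (D_tokenize_query_for_same_level_check_py query) := by
  unfold D_tokenize_query_for_same_level_check_py; infer_instance

def Spec_tokenize_query_for_same_level_check_py (query : String) (out : List String) : Prop :=
  ¬ D_tokenize_query_for_same_level_check_py query → out = tokenize_query_for_same_level_check_py_alt query

instance (query : String) (out : List String) : Decidable (Spec_tokenize_query_for_same_level_check_py query out) := by
  unfold Spec_tokenize_query_for_same_level_check_py; infer_instance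

def pvDiffWitness_tokenize_query_for_same_level_check_py : String := "\t("

def pvDiffWitnessOut_tokenize_query_for_same_level_check_py : (List String) × (List String) :=
  (["", "("], ["("])

-- ===== CLAIM (what is proved, stated in full; the proofs are below) =====
def Claim_unchanged_tokenize_query_for_same_level_check_py : Prop := ∀ (query : String), Dom_tokenize_query_for_same_level_check_py query → Spec_tokenize_query_for_same_level_check_py query (tokenize_query_for_same_level_check_py query)
def Claim_changed_tokenize_query_for_same_level_check_py : Prop := Dom_tokenize_query_for_same_level_check_py (pvDiffWitness_tokenize_query_for_same_level_check_py) ∧ D_tokenize_query_for_same_level_check_py (pvDiffWitness_tokenize_query_for_same_level_check_py) ∧ tokenize_query_for_same_level_check_py (pvDiffWitness_tokenize_query_for_same_level_check_py) = pvDiffWitnessOut_tokenize_query_for_same_level_check_py.1 ∧ tokenize_query_for_same_level_check_py_alt (pvDiffWitness_tokenize_query_for_same_level_check_py) = pvDiffWitnessOut_tokenize_query_for_same_level_check_py.2 ∧ pvDiffWitnessOut_tokenize_query_for_same_level_check_py.1 ≠ pvDiffWitnessOut_tokenize_query_for_same_level_check_py.2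

def Claim_exact_tokenize_query_for_same_level_check_py : Prop := ∀ (query : String), Dom_tokenize_query_for_same_level_check_py query → D_tokenize_query_for_same_level_check_py query → tokenize_query_for_same_level_check_py query ≠ tokenize_query_for_same_level_check_py_alt query

-- ===== LEMMAS AND PROOFS =====

theorem pvAQuoted_eq (rest acc : List Char) :
    pvAQuoted rest acc = (acc ++ (pvBQuote rest).1, (pvBQuote rest).2) := by
  induction rest, acc using pvAQuoted.induct with
  | _ => (try rw [pvAQuoted]) <;> (try rw [pvBQuote]) <;> (try split_ifs) <;> simp_all

-- inside a quoted phrase the automaton leaves quote mode exactly where B's quote scan ends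
theorem pvDAux_quote : ∀ (n : Nat) (rest : List Char) (prev : Char), rest.length ≤ n →
    (prev = '\\' → rest.head? ≠ some '"') →
    pvDAux rest prev true none = pvDAux (pvBQuote rest).2 '"' false none := by
  intro n
  induction n with
  | zero =>
    intro rest prev hlen _
    have : rest = [] := List.eq_nil_of_length_eq_zero (Nat.le_zero.mp hlen)
    subst this
    simp [pvDAux, pvBQuote]
  | succ n ih =>
    intro rest prev hlen hprev
    cases rest with
    | nil => simp [pvDAux, pvBQuote]
    | cons c rest =>
      have hr : rest.length ≤ n := by simpa using hlen
      by_cases hq : c = '"'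
      · subst hq
        have hp : ¬ prev = '\\' := fun h => (hprev h) rfl
        rw [pvDAux, pvBQuote]
        simp [hp]
      · by_cases hesc : c = '\\' ∧ rest.head? = some '"'
        · obtain ⟨hc, hh⟩ := hesc
          subst hc
          cases rest with
          | nil => simp at hh
          | cons d rest' =>
            have hd : d = '"' := by simpa using hh
            subst hd
            rw [pvDAux]
            rw [if_neg (by simp)]
            rw [pvDAux]
            rw [if_neg (by simp)]
            rw [pvBQuote]
            rw [if_neg (by decide), if_pos (by simp)]
            exact ih rest' '"' (by simp at hr; omega) (by intro h; cases h)
        · rw [pvDAux]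
          rw [if_neg (by rintro ⟨h1, -⟩; exact hq h1)]
          rw [pvBQuote]
          rw [if_neg hq, if_neg hesc]
          exact ih rest c hr (fun h => fun hh => hesc ⟨h, hh⟩)

theorem strip_eq_nil_iff (l : List Char) :
    PySem.Chars.strip l = [] ↔ l.all PySem.Chars.isspace = true := by
  simp only [PySem.Chars.strip, PySem.Chars.rstrip, PySem.Chars.lstrip,
    List.reverse_eq_nil_iff, List.dropWhile_eq_nil_iff, List.mem_reverse, List.all_eq_true]
  constructor
  · intro h x hx
    rcases List.mem_append.1
        ((List.takeWhile_append_dropWhile (p := PySem.Chars.isspace) (l := l)) ▸ hx) with h1 | h1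
    · exact List.mem_takeWhile_imp h1
    · exact h x h1
  · intro h x hx
    exact h x ((List.dropWhile_sublist PySem.Chars.isspace).subset hx)

-- the possibly-empty stripped word token B emits for a word run
def pvStripTok (cur : List Char) : List String :=
  if PySem.Chars.strip cur ≠ [] then [String.ofList (PySem.Chars.strip cur)] else []

def pvPend (cur : List Char) : Option Bool :=
  if cur = [] then none else some (cur.all PySem.Chars.isspace)

theorem takeWhile_append_all {p : Char → Bool} {l₁ : List Char} (l₂ : List Char)
    (h : l₁.all p = true) : (l₁ ++ l₂).takeWhile p = l₁ ++ l₂.takeWhile p := by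
  induction l₁ with
  | nil => simp
  | cons a t ih => simp_all [List.takeWhile_cons]

theorem dropWhile_append_all {p : Char → Bool} {l₁ : List Char} (l₂ : List Char)
    (h : l₁.all p = true) : (l₁ ++ l₂).dropWhile p = l₂.dropWhile p := by
  induction l₁ with
  | nil => simp
  | cons a t ih => simp_all [List.dropWhile_cons]

theorem strip_nil : PySem.Chars.strip [] = [] := by
  simp [PySem.Chars.strip, PySem.Chars.rstrip, PySem.Chars.lstrip]

-- B on (pending word run ++ rest starting with a boundary or empty) = word token ++ B on rest
theorem pvBScan_word_prefix (cur cs : List Char) (hcur : cur.all pvWordChar = true)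
    (hcs : ∀ c ∈ cs.head?, pvWordChar c = false) :
    pvBScan (cur ++ cs) = pvStripTok cur ++ pvBScan cs := by
  cases cur with
  | nil => simp [pvStripTok, strip_nil]
  | cons c t =>
    have hct : pvWordChar c = true ∧ t.all pvWordChar = true := by simpa using hcur
    have hc := hct.1
    have hsp : ¬ c = ' ' := by intro h; subst h; simp [pvWordChar] at hc
    have hqu : ¬ c = '"' := by intro h; subst h; simp [pvWordChar] at hc
    have hpa : ¬ (c = '(' ∨ c = ')') := by
      rintro (h | h) <;> (subst h; simp [pvWordChar] at hc)
    have htw : cs.takeWhile pvWordChar = [] := by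
      cases cs with
      | nil => rfl
      | cons d u => simp [List.takeWhile_cons, hcs d (by simp)]
    have hdw : cs.dropWhile pvWordChar = cs := by
      cases cs with
      | nil => rfl
      | cons d u => simp [List.dropWhile_cons, hcs d (by simp)]
    show pvBScan (c :: (t ++ cs)) = _
    rw [pvBScan]
    simp only [if_neg hsp, if_neg hqu, if_neg hpa]
    rw [takeWhile_append_all _ hct.2, dropWhile_append_all _ hct.2, htw, hdw]
    simp only [List.append_nil, pvStripTok]

theorem pvDAux_false_prev (cs : List Char) (p q : Char) (pend : Option Bool) :
    pvDAux cs p false pend = pvDAux cs q false pend := by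
  cases cs <;> rfl

theorem pvALoop_nil (cur : List Char) (toks : List String) :
    pvALoop [] cur toks = toks ++ pvStripTok cur := by
  rw [pvALoop]
  unfold pvStripTok
  split_ifs <;> simp_all [strip_nil]

-- the unconditional flush before a quote/parenthesis, when the run cannot strip to empty
theorem toks1_eq (cur : List Char) (toks : List String)
    (h : cur ≠ [] → PySem.Chars.strip cur ≠ []) :
    (if cur ≠ [] then toks ++ [String.ofList (PySem.Chars.strip cur)] else toks) =
      toks ++ pvStripTok cur := by
  unfold pvStripTok
  by_cases hc : cur = []
  · subst hc; simp [strip_nil]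
  · simp [hc, h hc]

theorem pvMain : ∀ (n : Nat) (cs cur : List Char) (toks : List String), cs.length ≤ n →
    cur.all pvWordChar = true → (∀ prev, pvDAux cs prev false (pvPend cur) = false) →
    pvALoop cs cur toks = toks ++ pvBScan (cur ++ cs) := by
  intro n
  induction n with
  | zero =>
    intro cs cur toks hlen hcur _
    have hnil : cs = [] := List.eq_nil_of_length_eq_zero (Nat.le_zero.mp hlen)
    subst hnil
    rw [pvBScan_word_prefix cur [] hcur (by simp), pvALoop_nil]
    simp [pvBScan]
  | succ n ih =>
    intro cs cur toks hlen hcur hDall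
    have hD := hDall ' '
    cases cs with
    | nil =>
      rw [pvBScan_word_prefix cur [] hcur (by simp), pvALoop_nil]
      simp [pvBScan]
    | cons c rest =>
      have hrest : rest.length ≤ n := by simpa using hlen
      by_cases hq : c = '"'
      · subst hq
        rw [pvALoop]
        simp only [reduceIte]
        rw [pvAQuoted_eq]
        rw [pvDAux] at hD
        simp only [reduceIte, Bool.or_eq_false_iff] at hD
        rw [pvDAux_quote rest.length rest '"' le_rfl (by intro h; cases h)] at hD
        have hstr : cur ≠ [] → PySem.Chars.strip cur ≠ [] := by
          intro hne hs
          have := (strip_eq_nil_iff cur).mp hs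
          simp [pvPend, hne, this] at hD
        rw [toks1_eq cur toks hstr]
        rw [ih (pvBQuote rest).2 [] _ (le_trans (pvBQuote_snd_length_le rest) hrest) rfl
          (by intro prev
              rw [pvDAux_false_prev _ prev '"']
              simpa [pvPend] using hD.2)]
        rw [pvBScan_word_prefix cur ('"' :: rest) hcur (by intro d hd; simp at hd; subst hd; rfl)]
        rw [pvBScan]
        simp only [if_pos rfl, if_neg (by decide : ¬ ('"' : Char) = ' ')]
        simp [List.append_assoc]
      · by_cases hp : c = '(' ∨ c = ')'
        · rw [pvALoop]
          simp only [if_neg hq, if_pos hp]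
          rw [pvDAux] at hD
          simp only [if_neg hq, if_pos hp, Bool.or_eq_false_iff] at hD
          have hstr : cur ≠ [] → PySem.Chars.strip cur ≠ [] := by
            intro hne hs
            have := (strip_eq_nil_iff cur).mp hs
            simp [pvPend, hne, this] at hD
          rw [toks1_eq cur toks hstr]
          rw [ih rest [] _ hrest rfl
            (by intro prev
                rw [pvDAux_false_prev _ prev c]
                simpa [pvPend] using hD.2)]
          have hw : pvWordChar c = false := by
            rcases hp with h | h <;> (subst h; rfl)
          rw [pvBScan_word_prefix cur (c :: rest) hcur (by intro d hd; simp at hd; subst hd; exact hw)]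
          have hsp : ¬ c = ' ' := by
            rcases hp with h | h <;> (subst h; decide)
          rw [pvBScan]
          simp only [if_neg hsp, if_neg hq, if_pos hp]
          simp [List.append_assoc]
        · by_cases hs : c = ' '
          · subst hs
            rw [pvALoop]
            simp only [if_neg hq, if_neg hp, reduceIte]
            rw [pvDAux] at hD
            simp only [if_neg hq, if_neg hp, reduceIte] at hD
            have h1 : (if cur ≠ [] then
                (if PySem.Chars.strip cur ≠ [] then toks ++ [String.ofList (PySem.Chars.strip cur)] else toks)
                else toks) = toks ++ pvStripTok cur := by
              unfold pvStripTok
              split_ifs <;> simp_all [strip_nil]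
            rw [h1]
            rw [ih rest [] _ hrest rfl
              (by intro prev
                  rw [pvDAux_false_prev _ prev ' ']
                  simpa [pvPend] using hD)]
            rw [pvBScan_word_prefix cur (' ' :: rest) hcur (by intro d hd; simp at hd; subst hd; rfl)]
            rw [pvBScan]
            simp [List.append_assoc]
          · have hpl : ¬ c = '(' := fun h => hp (Or.inl h)
            have hpr : ¬ c = ')' := fun h => hp (Or.inr h)
            have hw : pvWordChar c = true := by simp [pvWordChar, hs, hq, hpl, hpr]
            rw [pvALoop]
            simp only [if_neg hq, if_neg hp, if_neg hs]
            rw [pvDAux] at hD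
            simp only [if_neg hq, if_neg hp, if_neg hs] at hD
            have hcur' : (cur ++ [c]).all pvWordChar = true := by simp [hcur, hw]
            have hpend : ∀ prev, pvDAux rest prev false (pvPend (cur ++ [c])) = false := by
              intro prev
              rw [pvDAux_false_prev _ prev c]
              by_cases hsp : PySem.Chars.isspace c = true
              · rw [if_pos hsp] at hD
                have : pvPend (cur ++ [c]) = some ((pvPend cur != some false)) := by
                  cases cur with
                  | nil => simp [pvPend, hsp]
                  | cons a t =>
                    have hall : ((a :: t) ++ [c]).all PySem.Chars.isspace
                        = (a :: t).all PySem.Chars.isspace := by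
                      simp [List.all_append, hsp]
                    simp only [pvPend, if_neg (show ¬((a :: t) ++ [c]) = [] by simp),
                      if_neg (show ¬(a :: t) = [] by simp), hall]
                    generalize (a :: t).all PySem.Chars.isspace = x
                    cases x <;> rfl
                rw [this]; exact hD
              · rw [if_neg hsp] at hD
                have hcf : PySem.Chars.isspace c = false := by
                  revert hsp; cases PySem.Chars.isspace c <;> simp
                have : pvPend (cur ++ [c]) = some false := by
                  simp [pvPend, List.all_append, hcf]
                rw [this]; exact hD
            rw [ih rest (cur ++ [c]) toks hrest hcur' hpend]
            simp [List.append_assoc]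
theorem ofList_ne_empty {l : List Char} (h : l ≠ []) : String.ofList l ≠ "" := by
  intro he
  have := congrArg String.toList he
  simp at this
  exact h this

-- B never emits an empty token
theorem pvBScan_no_empty : ∀ (n : Nat) (cs : List Char), cs.length ≤ n → ¬ "" ∈ pvBScan cs := by
  intro n
  induction n with
  | zero =>
    intro cs hlen
    have : cs = [] := List.eq_nil_of_length_eq_zero (Nat.le_zero.mp hlen)
    subst this
    simp [pvBScan]
  | succ n ih =>
    intro cs hlen
    cases cs with
    | nil => simp [pvBScan]
    | cons c rest =>
      have hrest : rest.length ≤ n := by simpa using hlen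
      rw [pvBScan]
      split_ifs with h1 h2 h3
      · exact ih rest hrest
      · simp only [List.mem_cons, not_or]
        exact ⟨fun he => ofList_ne_empty (by simp) he.symm,
          ih (pvBQuote rest).2 (le_trans (pvBQuote_snd_length_le rest) hrest)⟩
      · simp only [List.mem_cons, not_or]
        exact ⟨fun he => ofList_ne_empty (by simp) he.symm, ih rest hrest⟩
      · simp only [List.mem_append, not_or]
        refine ⟨?_, ih (rest.dropWhile pvWordChar) (le_trans (List.length_dropWhile_le _ _) hrest)⟩
        split_ifs with hw
        · simp only [List.mem_singleton]
          exact fun he => ofList_ne_empty hw he.symm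
        · simp

-- A's loop only ever appends to the token list
theorem pvALoop_mem_mono_aux (t : String) : ∀ (n : Nat) (cs cur : List Char) (toks : List String),
    cs.length ≤ n → t ∈ toks → t ∈ pvALoop cs cur toks := by
  intro n
  induction n with
  | zero =>
    intro cs cur toks hlen ht
    have : cs = [] := List.eq_nil_of_length_eq_zero (Nat.le_zero.mp hlen)
    subst this
    rw [pvALoop]
    split_ifs <;> simp [ht]
  | succ n ih =>
    intro cs cur toks hlen ht
    cases cs with
    | nil =>
      rw [pvALoop]
      split_ifs <;> simp [ht]
    | cons c rest =>
      have hrest : rest.length ≤ n := by simpa using hlen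
      rw [pvALoop]
      split_ifs <;>
        first
        | exact ih _ _ _ (le_trans (pvAQuoted_snd_length_le rest ['"']) hrest) (by simp [ht])
        | exact ih _ _ _ hrest (by simp [ht])
        | exact ih _ _ _ hrest ht

theorem pvALoop_mem_mono {t : String} (cs cur : List Char) (toks : List String)
    (ht : t ∈ toks) : t ∈ pvALoop cs cur toks :=
  pvALoop_mem_mono_aux t cs.length cs cur toks le_rfl ht

-- inside D_, A's loop emits an empty token
theorem pvAEmpty : ∀ (n : Nat) (cs cur : List Char) (toks : List String), cs.length ≤ n →
    cur.all pvWordChar = true → pvDAux cs ' ' false (pvPend cur) = true →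
    "" ∈ pvALoop cs cur toks := by
  intro n
  induction n with
  | zero =>
    intro cs cur toks hlen _ hD
    have : cs = [] := List.eq_nil_of_length_eq_zero (Nat.le_zero.mp hlen)
    subst this
    simp [pvDAux] at hD
  | succ n ih =>
    intro cs cur toks hlen hcur hD
    cases cs with
    | nil => simp [pvDAux] at hD
    | cons c rest =>
      have hrest : rest.length ≤ n := by simpa using hlen
      by_cases hq : c = '"'
      · subst hq
        rw [pvALoop]
        simp only [reduceIte]
        rw [pvDAux] at hD
        simp only [reduceIte, Bool.or_eq_true] at hD
        rcases hD with hD | hD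
        · have hcne : cur ≠ [] ∧ cur.all PySem.Chars.isspace = true := by
            by_cases hc : cur = []
            · simp [pvPend, hc] at hD
            · refine ⟨hc, ?_⟩
              simpa [pvPend, hc] using hD
          have hstrip : PySem.Chars.strip cur = [] := (strip_eq_nil_iff cur).mpr hcne.2
          apply pvALoop_mem_mono
          simp [hcne.1, hstrip]
        · rw [pvDAux_quote rest.length rest '"' le_rfl (by intro h; cases h)] at hD
          rw [pvAQuoted_eq]
          apply ih (pvBQuote rest).2 [] _ (le_trans (pvBQuote_snd_length_le rest) hrest) rfl
          rw [pvDAux_false_prev _ ' ' '"']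
          simpa [pvPend] using hD
      · by_cases hp : c = '(' ∨ c = ')'
        · rw [pvALoop]
          simp only [if_neg hq, if_pos hp]
          rw [pvDAux] at hD
          simp only [if_neg hq, if_pos hp, Bool.or_eq_true] at hD
          rcases hD with hD | hD
          · have hcne : cur ≠ [] ∧ cur.all PySem.Chars.isspace = true := by
              by_cases hc : cur = []
              · simp [pvPend, hc] at hD
              · refine ⟨hc, ?_⟩
                simpa [pvPend, hc] using hD
            have hstrip : PySem.Chars.strip cur = [] := (strip_eq_nil_iff cur).mpr hcne.2
            apply pvALoop_mem_mono
            simp [hcne.1, hstrip]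
          · apply ih rest [] _ hrest rfl
            rw [pvDAux_false_prev _ ' ' c]
            simpa [pvPend] using hD
        · by_cases hs : c = ' '
          · subst hs
            rw [pvALoop]
            simp only [if_neg hq, if_neg hp, reduceIte]
            rw [pvDAux] at hD
            simp only [if_neg hq, if_neg hp, reduceIte] at hD
            apply ih rest [] _ hrest rfl
            simpa [pvPend] using hD
          · rw [pvALoop]
            simp only [if_neg hq, if_neg hp, if_neg hs]
            rw [pvDAux] at hD
            simp only [if_neg hq, if_neg hp, if_neg hs] at hD
            have hpl : ¬ c = '(' := fun h => hp (Or.inl h)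
            have hpr : ¬ c = ')' := fun h => hp (Or.inr h)
            have hw : pvWordChar c = true := by simp [pvWordChar, hs, hq, hpl, hpr]
            have hcur' : (cur ++ [c]).all pvWordChar = true := by simp [hcur, hw]
            apply ih rest (cur ++ [c]) toks hrest hcur'
            rw [pvDAux_false_prev _ ' ' c]
            by_cases hsp : PySem.Chars.isspace c = true
            · rw [if_pos hsp] at hD
              have : pvPend (cur ++ [c]) = some ((pvPend cur != some false)) := by
                cases cur with
                | nil => simp [pvPend, hsp]
                | cons a t =>
                  have hall : ((a :: t) ++ [c]).all PySem.Chars.isspace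
                      = (a :: t).all PySem.Chars.isspace := by
                    simp [List.all_append, hsp]
                  simp only [pvPend, if_neg (show ¬((a :: t) ++ [c]) = [] by simp),
                    if_neg (show ¬(a :: t) = [] by simp), hall]
                  generalize (a :: t).all PySem.Chars.isspace = x
                  cases x <;> rfl
              rw [this]; exact hD
            · rw [if_neg hsp] at hD
              have hcf : PySem.Chars.isspace c = false := by
                revert hsp; cases PySem.Chars.isspace c <;> simp
              have : pvPend (cur ++ [c]) = some false := by
                simp [pvPend, List.all_append, hcf]
              rw [this]; exact hD

-- ===== VERDICT (by name: the statement is the Claim_ definition above) =====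
theorem tokenize_query_for_same_level_check_py_spec : Claim_unchanged_tokenize_query_for_same_level_check_py := by
  intro query _ hD
  unfold D_tokenize_query_for_same_level_check_py at hD
  unfold tokenize_query_for_same_level_check_py tokenize_query_for_same_level_check_py_alt
  have h := pvMain query.toList.length query.toList [] [] le_rfl rfl
    (by intro prev
        rw [pvDAux_false_prev _ prev ' ']
        simpa [pvPend] using Bool.eq_false_iff.mpr hD)
  simpa using h

theorem tokenize_query_for_same_level_check_py_changed : Claim_changed_tokenize_query_for_same_level_check_py := by
  unfold Claim_changed_tokenize_query_for_same_level_check_py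
  refine ⟨by decide, ?_, ?_, ?_, by decide⟩
  · unfold D_tokenize_query_for_same_level_check_py pvDiffWitness_tokenize_query_for_same_level_check_py
    decide
  · unfold tokenize_query_for_same_level_check_py pvDiffWitness_tokenize_query_for_same_level_check_py
    simp [pvALoop, pvAQuoted]
    decide
  · unfold tokenize_query_for_same_level_check_py_alt pvDiffWitness_tokenize_query_for_same_level_check_py
    simp [pvBScan, pvBQuote, pvWordChar, List.takeWhile, List.dropWhile, PySem.Chars.strip,
      PySem.Chars.lstrip, PySem.Chars.rstrip, PySem.Chars.isspace,
      pvDiffWitnessOut_tokenize_query_for_same_level_check_py]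

theorem tokenize_query_for_same_level_check_py_tight : Claim_exact_tokenize_query_for_same_level_check_py := by
  intro query _ hD heq
  unfold D_tokenize_query_for_same_level_check_py at hD
  have hA : "" ∈ tokenize_query_for_same_level_check_py query := by
    unfold tokenize_query_for_same_level_check_py
    exact pvAEmpty query.toList.length query.toList [] [] le_rfl rfl (by simpa [pvPend] using hD)
  have hB : ¬ "" ∈ tokenize_query_for_same_level_check_py_alt query := by
    unfold tokenize_query_for_same_level_check_py_alt
    exact pvBScan_no_empty query.toList.length query.toList le_rfl
  rw [heq] at hA
  exact hB hA
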